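-- pv_equiv track=rewrite | github.com/slacksky/ptyhon-basic-talleres | cuarte_semana/funciones_ciclos.py | row_builder
-- ===== SOURCE A (Python) =====
-- def tile_third(color):
--   if color == 0:
--     return "***"
--   else:
--     return "   "
--
-- def row_builder(longitud):
--   tileb=""
--   tilew=""
--   for i in range(longitud):
--     tileb+=tile_third(i%2)
--
--   if longitud>1:
--     for i in range(longitud):
--       tilew+=tile_third((i+1)%2)
--   return tileb,tilew
-- ===== SOURCE B (Python) =====
-- def row_builder(longitud):
--     m = max(longitud, 0)
--     half, odd = divmod(m, 2)
--     tileb = "***   " * half + "***" * odd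
--     tilew = ("   ***" * half + "   " * odd) if longitud > 1 else ""
--     return tileb, tilew
-- ===== Notes on version B (the rewrite author's own statement) =====
-- stated objective: faster
-- what changed: Replaced the two per-index loops calling tile_third with closed-form construction: repeat the two-tile period half as many times plus an odd leftover tile, clamping negative lengths to zero.
import Mathlib
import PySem

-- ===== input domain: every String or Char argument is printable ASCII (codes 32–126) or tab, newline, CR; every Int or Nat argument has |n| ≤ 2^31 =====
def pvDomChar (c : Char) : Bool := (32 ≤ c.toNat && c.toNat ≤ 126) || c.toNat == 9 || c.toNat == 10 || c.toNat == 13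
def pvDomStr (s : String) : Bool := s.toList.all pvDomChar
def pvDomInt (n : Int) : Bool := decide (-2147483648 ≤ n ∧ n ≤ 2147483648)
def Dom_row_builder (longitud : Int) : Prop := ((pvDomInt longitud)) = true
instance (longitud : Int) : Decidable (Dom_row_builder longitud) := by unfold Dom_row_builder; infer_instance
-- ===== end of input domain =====

-- B replaces A's two per-index loops by closed-form repetition of the two-tile period (objective: simpler).

-- ===== PORT A =====
def tile_third (color : Int) : String :=
  if color == 0 then "***" else "   "

def row_builder (longitud : Int) : String × String :=
  let tileb := (PySem.List.pyRange 0 longitud 1).foldl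
    (fun acc i => acc ++ tile_third (PySem.Int.mod i 2)) ""
  let tilew :=
    if longitud > 1 then
      (PySem.List.pyRange 0 longitud 1).foldl
        (fun acc i => acc ++ tile_third (PySem.Int.mod (i + 1) 2)) ""
    else ""
  (tileb, tilew)

-- ===== PORT B =====
-- Python's 's * k' for k ≥ 0 (B only multiplies by non-negative counts).
def strMul (s : String) (k : Int) : String :=
  String.join (List.replicate k.toNat s)

def row_builder_alt (longitud : Int) : String × String :=
  let m := max longitud 0
  let half := PySem.Int.floordiv m 2
  let odd := PySem.Int.mod m 2
  let tileb := strMul "***   " half ++ strMul "***" odd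
  let tilew :=
    if longitud > 1 then strMul "   ***" half ++ strMul "   " odd else ""
  (tileb, tilew)

-- ===== PRECONDITION & SPEC =====
def Spec_row_builder (longitud : Int) (out : String × String) : Prop := out = row_builder_alt longitud
instance (longitud : Int) (out : String × String) : Decidable (Spec_row_builder longitud out) := by unfold Spec_row_builder; infer_instance

-- ===== CLAIM (what is proved, stated in full; the proofs are below) =====
def Claim_equal_row_builder : Prop := ∀ (longitud : Int), Dom_row_builder longitud → Spec_row_builder longitud (row_builder longitud)

-- ===== LEMMAS AND PROOFS =====

theorem foldl_shift (l : List String) (a : String) :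
    l.foldl (· ++ ·) a = a ++ l.foldl (· ++ ·) "" := by
  induction l generalizing a with
  | nil => simp
  | cons x xs ih =>
      simp only [List.foldl_cons]
      rw [ih (a ++ x), ih ("" ++ x)]
      simp [String.append_assoc]

theorem join_cons (s : String) (l : List String) :
    String.join (s :: l) = s ++ String.join l := by
  rw [String.join, List.foldl_cons, String.join, foldl_shift]; simp

theorem join_append (l1 l2 : List String) :
    String.join (l1 ++ l2) = String.join l1 ++ String.join l2 := by
  induction l1 with
  | nil => simp [String.join]
  | cons x xs ih =>
      simp only [List.cons_append, join_cons, ih, String.append_assoc]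

theorem join_replicate_succ (k : Nat) (s : String) :
    String.join (List.replicate (k + 1) s) = String.join (List.replicate k s) ++ s := by
  rw [List.replicate_succ', join_append]
  simp [String.join]

-- folding string concatenation equals join of the mapped list
theorem foldl_append_join (l : List Int) (g : Int → String) (s : String) :
    l.foldl (fun acc i => acc ++ g i) s = s ++ String.join (l.map g) := by
  induction l generalizing s with
  | nil => simp [String.join]
  | cons x xs ih =>
      simp only [List.foldl_cons, List.map_cons, ih, join_cons, String.append_assoc]

-- the central pattern lemma: alternating tiles over range n, closed form
theorem alt_join (s0 s1 : String) (n : Nat) :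
    String.join ((List.range n).map (fun (k : Nat) => if (k : Int) % 2 == 0 then s0 else s1)) =
      String.join (List.replicate (n / 2) (s0 ++ s1)) ++ String.join (List.replicate (n % 2) s0) := by
  induction n with
  | zero => simp [String.join]
  | succ n ih =>
      rw [List.range_succ, List.map_append, List.map_singleton, join_append, ih]
      rcases Nat.even_or_odd n with he | ho
      · obtain ⟨k, hk⟩ := he
        have h1 : n / 2 = k := by omega
        have h2 : n % 2 = 0 := by omega
        have h3 : (n + 1) / 2 = k := by omega
        have h4 : (n + 1) % 2 = 1 := by omega
        have h5 : ((n : Int) % 2 == 0) = true := by simp; omega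
        rw [h1, h2, h3, h4, h5]
        simp [String.join]
      · obtain ⟨k, hk⟩ := ho
        have h1 : n / 2 = k := by omega
        have h2 : n % 2 = 1 := by omega
        have h3 : (n + 1) / 2 = k + 1 := by omega
        have h4 : (n + 1) % 2 = 0 := by omega
        have h5 : ((n : Int) % 2 == 0) = false := by simp; omega
        rw [h1, h2, h3, h4, h5, join_replicate_succ k (s0 ++ s1)]
        simp [String.join, String.append_assoc]

theorem range_cast (n : Int) :
    PySem.List.pyRange 0 n 1 = (List.range n.toNat).map (fun (k : Nat) => (k : Int)) := by
  rw [PySem.List.pyRange_one]; simp only [Int.sub_zero, zero_add]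

theorem row_builder_spec_core (longitud : Int) :
    row_builder longitud = row_builder_alt longitud := by
  by_cases hle : longitud ≤ 0
  · -- non-positive: both sides are ("","")
    have hr : PySem.List.pyRange 0 longitud 1 = [] := PySem.List.pyRange_one_eq_nil hle
    have hm : max longitud 0 = 0 := by omega
    have hng : ¬ longitud > 1 := by omega
    simp [row_builder, row_builder_alt, hr, hm, hng, strMul, String.join,
      PySem.Int.floordiv, PySem.Int.mod]
  · have hn0 : 0 ≤ longitud := by omega
    have hm : max longitud 0 = longitud := by omega
    have hfd : PySem.Int.floordiv longitud 2 = longitud / 2 := by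
      simp [PySem.Int.floordiv, Int.fdiv_eq_ediv]
    have hmd : PySem.Int.mod longitud 2 = longitud % 2 := by
      simp [PySem.Int.mod, Int.fmod_eq_emod]
    have htd : (longitud / 2).toNat = longitud.toNat / 2 := by omega
    have htm : (longitud % 2).toNat = longitud.toNat % 2 := by omega
    have hgen : ∀ s0 s1 : String,
        (PySem.List.pyRange 0 longitud 1).foldl
            (fun acc i => acc ++ (if PySem.Int.mod i 2 == 0 then s0 else s1)) ""
          = strMul (s0 ++ s1) (longitud / 2) ++ strMul s0 (longitud % 2) := by
      intro s0 s1
      rw [foldl_append_join, range_cast longitud, List.map_map]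
      have hfun : ((fun i => if PySem.Int.mod i 2 == 0 then s0 else s1) ∘ fun (k : Nat) => (k : Int))
          = fun (k : Nat) => if (k : Int) % 2 == 0 then s0 else s1 := by
        funext k
        simp [PySem.Int.mod, Int.fmod_eq_emod]
      rw [hfun, alt_join s0 s1 longitud.toNat]
      simp [strMul, htd, htm]
    have key : (fun (acc : String) (i : Int) => acc ++ tile_third (PySem.Int.mod (i + 1) 2))
        = fun (acc : String) (i : Int) => acc ++ (if PySem.Int.mod i 2 == 0 then "   " else "***") := by
      funext acc i
      have hpar : (PySem.Int.mod (i + 1) 2 == 0) = !(PySem.Int.mod i 2 == 0) := by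
        have h2 : PySem.Int.mod (i + 1) 2 = (i + 1) % 2 := by simp [PySem.Int.mod, Int.fmod_eq_emod]
        have h3 : PySem.Int.mod i 2 = i % 2 := by simp [PySem.Int.mod, Int.fmod_eq_emod]
        rw [h2, h3]
        rcases Int.emod_two_eq_zero_or_one i with h | h
        · have h4 : (i + 1) % 2 = 1 := by omega
          rw [h, h4]; rfl
        · have h4 : (i + 1) % 2 = 0 := by omega
          rw [h, h4]; rfl
      simp only [tile_third, hpar]
      cases h : (PySem.Int.mod i 2 == 0) <;> simp
    simp only [row_builder, row_builder_alt, hm, hfd, hmd, Prod.mk.injEq, key]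
    refine ⟨?_, ?_⟩
    · -- tileb
      have := hgen "***" "   "
      simpa [tile_third] using this
    · -- tilew
      by_cases hg : longitud > 1
      · rw [if_pos hg, if_pos hg]
        exact hgen "   " "***"
      · rw [if_neg hg, if_neg hg]

-- ===== VERDICT (by name: the statement is the Claim_ definition above) =====
theorem row_builder_spec : Claim_equal_row_builder := by
  intro longitud _
  show row_builder longitud = row_builder_alt longitud
  exact row_builder_spec_core longitud
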